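-- pv_equiv track=rewrite | github.com/vikkastiwari/competitive-coding-questions | company/InfyTQ/Fundamentals/04SET/smsEncoding.py | sms_encoding
-- ===== SOURCE A (Python) =====
-- def sms_encoding(data):
--     # start writing your code here
--     vowels = "aeiou"
--     l = data.split()
--     l1 = []
--     for word in l:
--         for each in word:
--             if each in vowels:
--                 pass
--             else:
--                 l1.append(each)
--         l1.append(" ")
--     return ("").join(l1)
-- ===== SOURCE B (Python) =====
-- def sms_encoding(data):
--     out = []
--     in_word = False
--     for c in data:
--         if c.isspace():
--             if in_word:
--                 out.append(" ")
--             in_word = False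
--         else:
--             in_word = True
--             if c not in "aeiou":
--                 out.append(c)
--     if in_word:
--         out.append(" ")
--     return "".join(out)
-- ===== Notes on version B (the rewrite author's own statement) =====
-- stated objective: alternative
-- what changed: Replaces split-into-words plus per-word filtering by a single pass over the raw characters with an in_word flag, never building the word list.
import Mathlib
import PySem

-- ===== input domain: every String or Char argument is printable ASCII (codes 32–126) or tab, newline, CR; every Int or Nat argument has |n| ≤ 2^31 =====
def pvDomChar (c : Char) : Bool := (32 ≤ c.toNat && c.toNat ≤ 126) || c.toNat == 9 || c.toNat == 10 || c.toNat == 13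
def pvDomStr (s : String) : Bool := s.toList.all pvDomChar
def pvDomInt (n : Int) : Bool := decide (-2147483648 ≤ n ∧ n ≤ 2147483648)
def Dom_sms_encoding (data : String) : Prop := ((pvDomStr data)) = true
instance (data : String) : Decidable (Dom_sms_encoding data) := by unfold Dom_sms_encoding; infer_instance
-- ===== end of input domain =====

-- B replaces A's split-into-words pass by a single scan over the characters with an in_word flag (alternative decomposition, same cost).

-- ===== PORT A =====
def sms_encoding (data : String) : String :=
  let vowels : List Char := "aeiou".toList
  let l := PySem.Chars.split₀ data.toList
  let l1 := l.foldl (fun l1 word =>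
    (word.foldl (fun l1 each =>
      if vowels.contains each then l1 else l1 ++ [each]) l1) ++ [' ']) []
  String.ofList l1

-- ===== PORT B =====
def sms_encoding_alt (data : String) : String :=
  let st := data.toList.foldl (fun (st : List Char × Bool) c =>
    if PySem.Chars.isspace c then
      (if st.2 then st.1 ++ [' '] else st.1, false)
    else
      (if ("aeiou".toList).contains c then st.1 else st.1 ++ [c], true)) ([], false)
  String.ofList (if st.2 then st.1 ++ [' '] else st.1)

-- ===== PRECONDITION & SPEC =====
def Spec_sms_encoding (data : String) (out : String) : Prop := out = sms_encoding_alt data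
instance (data : String) (out : String) : Decidable (Spec_sms_encoding data out) := by unfold Spec_sms_encoding; infer_instance

-- ===== CLAIM (what is proved, stated in full; the proofs are below) =====
def Claim_equal_sms_encoding : Prop := ∀ (data : String), Dom_sms_encoding data → Spec_sms_encoding data (sms_encoding data)

-- ===== LEMMAS AND PROOFS =====

-- characters kept by the filter
def pvNV (c : Char) : Bool := !("aeiou".toList).contains c

-- rendered output of a list of words, as A produces it
def pvF (ws : List (List Char)) : List Char :=
  (ws.map (fun w => w.filter pvNV ++ [' '])).flatten

-- the single-pass result as a structural recursion (proof-side model of B)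
def pvG : List Char → Bool → List Char
  | [], inw => if inw then [' '] else []
  | c :: rest, inw =>
    if PySem.Chars.isspace c then
      (if inw then ' ' :: pvG rest false else pvG rest false)
    else
      (if ("aeiou".toList).contains c then pvG rest true else c :: pvG rest true)

theorem pvA_inner (word : List Char) : ∀ (l1 : List Char),
    word.foldl (fun l1 each =>
      if ("aeiou".toList).contains each then l1 else l1 ++ [each]) l1
      = l1 ++ word.filter pvNV := by
  induction word with
  | nil => intro l1; simp [pvF]
  | cons c rest ih =>
    intro l1
    simp only [List.foldl_cons]
    by_cases h : ("aeiou".toList).contains c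
    · rw [if_pos h, ih, List.filter_cons_of_neg (by have h' := h; simp at h'; simp [pvNV]; tauto)]
    · rw [if_neg h, ih, List.filter_cons_of_pos (by have h' := h; simp at h'; simp [pvNV]; tauto)]
      simp

theorem pvA_outer (ws : List (List Char)) : ∀ (l1 : List Char),
    ws.foldl (fun l1 word =>
      (word.foldl (fun l1 each =>
        if ("aeiou".toList).contains each then l1 else l1 ++ [each]) l1) ++ [' ']) l1
      = l1 ++ pvF ws := by
  induction ws with
  | nil => intro l1; simp [pvF]
  | cons w rest ih =>
    intro l1
    simp only [List.foldl_cons]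
    rw [pvA_inner, ih]
    simp [pvF]

theorem pvF_append (xs ys : List (List Char)) : pvF (xs ++ ys) = pvF xs ++ pvF ys := by
  simp [pvF]

theorem pvSplit_go (rest : List Char) : ∀ (cur : List Char) (acc : List (List Char)),
    pvF (PySem.Chars.split₀.go rest cur acc)
      = pvF acc.reverse ++ cur.reverse.filter pvNV ++ pvG rest (!cur.isEmpty) := by
  induction rest with
  | nil =>
    intro cur acc
    by_cases h : cur.isEmpty
    · have : cur = [] := by simpa [List.isEmpty_iff] using h
      subst this
      simp [PySem.Chars.split₀.go, pvG, pvF]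
    · simp [PySem.Chars.split₀.go, h, pvG, pvF_append, pvF]
  | cons c rest ih =>
    intro cur acc
    by_cases hs : PySem.Chars.isspace c
    · by_cases h : cur.isEmpty
      · have hc : cur = [] := by simpa [List.isEmpty_iff] using h
        subst hc
        rw [show PySem.Chars.split₀.go (c :: rest) [] acc = PySem.Chars.split₀.go rest [] acc from by
          simp [PySem.Chars.split₀.go, hs]]
        rw [ih]
        simp [pvG, hs]
      · rw [show PySem.Chars.split₀.go (c :: rest) cur acc
              = PySem.Chars.split₀.go rest [] (cur.reverse :: acc) from by
          simp [PySem.Chars.split₀.go, hs, h]]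
        rw [ih]
        simp [pvG, hs, h, pvF_append, pvF]
    · have hgo : PySem.Chars.split₀.go (c :: rest) cur acc
          = PySem.Chars.split₀.go rest (c :: cur) acc := by
        simp [PySem.Chars.split₀.go, hs]
      rw [hgo, ih]
      by_cases hv : ("aeiou".toList).contains c
      · have h' := hv; simp at h'
        have hnv : pvNV c = false := by simp [pvNV]; tauto
        simp [pvG, hs, hnv, List.filter_append, h']
      · have h' := hv; simp at h'
        have hnv : pvNV c = true := by simp [pvNV]; tauto
        obtain ⟨h1, h2, h3, h4, h5⟩ := h'
        simp [pvG, hs, hnv, List.filter_append, h1, h2, h3, h4, h5]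

theorem pvB_loop (cs : List Char) : ∀ (acc : List Char) (inw : Bool),
    (if (cs.foldl (fun (st : List Char × Bool) c =>
      if PySem.Chars.isspace c then
        (if st.2 then st.1 ++ [' '] else st.1, false)
      else
        (if ("aeiou".toList).contains c then st.1 else st.1 ++ [c], true)) (acc, inw)).2
     then (cs.foldl (fun (st : List Char × Bool) c =>
      if PySem.Chars.isspace c then
        (if st.2 then st.1 ++ [' '] else st.1, false)
      else
        (if ("aeiou".toList).contains c then st.1 else st.1 ++ [c], true)) (acc, inw)).1 ++ [' ']
     else (cs.foldl (fun (st : List Char × Bool) c =>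
      if PySem.Chars.isspace c then
        (if st.2 then st.1 ++ [' '] else st.1, false)
      else
        (if ("aeiou".toList).contains c then st.1 else st.1 ++ [c], true)) (acc, inw)).1)
      = acc ++ pvG cs inw := by
  induction cs with
  | nil =>
    intro acc inw
    cases inw <;> simp [pvG]
  | cons c rest ih =>
    intro acc inw
    simp only [List.foldl_cons]
    by_cases hs : PySem.Chars.isspace c
    · cases inw <;> simp only [hs, if_true, if_false, Bool.false_eq_true, ite_true, ite_false] <;>
        rw [ih] <;> simp [pvG, hs]
    · by_cases hv : ("aeiou".toList).contains c
      · have h' := hv; simp at h'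
        simp only [hs, hv, Bool.false_eq_true, ite_false, ite_true]
        rw [ih]
        simp [pvG, hs, h']
      · have h' := hv; simp at h'
        obtain ⟨h1, h2, h3, h4, h5⟩ := h'
        simp only [hs, hv, Bool.false_eq_true, ite_false, ite_true]
        rw [ih]
        simp [pvG, hs, h1, h2, h3, h4, h5]

-- ===== VERDICT (by name: the statement is the Claim_ definition above) =====
theorem sms_encoding_spec : Claim_equal_sms_encoding := by
  intro data _
  unfold Spec_sms_encoding sms_encoding sms_encoding_alt
  have hA : (PySem.Chars.split₀ data.toList).foldl (fun l1 word =>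
      (word.foldl (fun l1 each =>
        if ("aeiou".toList).contains each then l1 else l1 ++ [each]) l1) ++ [' ']) []
      = pvG data.toList false := by
    rw [pvA_outer]
    have := pvSplit_go data.toList [] []
    simpa [PySem.Chars.split₀, pvF] using this
  have hB := pvB_loop data.toList [] false
  simp only at hA hB ⊢
  rw [hA]
  rw [show ([] : List Char) ++ pvG data.toList false = pvG data.toList false from by simp] at hB
  rw [← hB]
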